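-- pv_equiv track=rewrite | github.com/pragavigithub/Emerald_Barcode_20260129 | modules/multi_grn_creation/gs1_decoder.py | decode_gs1
-- ===== SOURCE A (Python) =====
-- AI_FIXED = {
--     "00": 18,  # SSCC
--     "01": 14,  # GTIN
--     "11": 6,   # MFG
--     "17": 6    # EXP
-- }
--
-- AI_VARIABLE = ["10","21","30","37","92","240"]
--
-- ALL_AIS = ["00","01","10","11","17","21","30","37","92","240"]
--
-- def normalize_raw(raw):
--     return raw.replace('\x1d','|').replace('\u001d','|').replace('(','').replace(')','')
--
-- def decode_gs1(raw):
--     raw = normalize_raw(raw)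
--     i = 0
--     data = {}
--
--     while i < len(raw):
--         # detect AI
--         if raw[i:i+3] == "240":
--             ai = "240"
--             start = i + 3
--         else:
--             ai = raw[i:i+2]
--             start = i + 2
--
--         # FIXED
--         if ai in AI_FIXED:
--             ln = AI_FIXED[ai]
--             data[ai] = raw[start:start+ln]
--             i = start + ln
--
--         # VARIABLE
--         elif ai in AI_VARIABLE:
--             end = len(raw)
--             pipe = raw.find('|', start)
--             if pipe != -1:
--                 end = pipe
--
--             for nxt in ALL_AIS:
--                 p = raw.find(nxt, start)
--                 if p != -1 and p < end:
--                     end = p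
--
--             data[ai] = raw[start:end]
--             i = end
--
--         else:
--             i += 1
--
--     return data
-- ===== SOURCE B (Python) =====
-- AI_FIXED = {
--     "00": 18,  # SSCC
--     "01": 14,  # GTIN
--     "11": 6,   # MFG
--     "17": 6    # EXP
-- }
--
-- AI_VARIABLE = ["10", "21", "30", "37", "92", "240"]
--
-- ALL_AIS = ["00", "01", "10", "11", "17", "21", "30", "37", "92", "240"]
--
--
-- def _next_stop(raw, pos):
--     # first position >= pos where a pipe or any AI string starts; len(raw) if none
--     n = len(raw)
--     while pos < n:
--         if raw[pos] == '|' or any(raw.startswith(a, pos) for a in ALL_AIS):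
--             return pos
--         pos += 1
--     return n
--
--
-- def decode_gs1(raw):
--     raw = raw.replace('\x1d', '|').replace('\u001d', '|').replace('(', '').replace(')', '')
--     n = len(raw)
--     data = {}
--     i = 0
--     while i < n:
--         if raw.startswith("240", i):
--             ai, start = "240", i + 3
--         else:
--             ai, start = raw[i:i + 2], i + 2
--
--         if ai in AI_FIXED:
--             ln = AI_FIXED[ai]
--             data[ai] = raw[start:start + ln]
--             i = start + ln
--         elif ai in AI_VARIABLE:
--             end = _next_stop(raw, start)
--             data[ai] = raw[start:end]
--             i = end
--         else:
--             i += 1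
--     return data
-- ===== Notes on version B (the rewrite author's own statement) =====
-- stated objective: alternative
-- what changed: On each variable-length AI, A calls str.find for the pipe and for all 10 AI patterns from `start` and folds the minimum; B instead makes one forward scan from `start` to the first position where a pipe or any AI pattern starts (and tests the '240' prefix with startswith instead of a slice comparison).
import Mathlib
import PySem

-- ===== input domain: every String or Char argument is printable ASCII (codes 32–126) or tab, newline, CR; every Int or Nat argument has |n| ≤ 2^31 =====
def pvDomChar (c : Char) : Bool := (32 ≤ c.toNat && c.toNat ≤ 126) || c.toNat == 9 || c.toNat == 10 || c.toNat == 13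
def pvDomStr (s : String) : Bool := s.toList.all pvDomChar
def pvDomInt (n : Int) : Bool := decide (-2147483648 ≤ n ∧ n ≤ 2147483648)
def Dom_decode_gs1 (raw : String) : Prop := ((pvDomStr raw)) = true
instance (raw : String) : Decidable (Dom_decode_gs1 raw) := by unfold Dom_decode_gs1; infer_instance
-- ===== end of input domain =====

-- B replaces A's per-token minimum over 11 str.find results (pipe + 10 AI patterns, each searched
-- from `start` on every variable-length AI) by a single forward scan from `start` to the first
-- position where a pipe or any AI pattern starts; objective: alternative (same measured cost).

-- ===== PORT A =====

-- module constants (shared by both Pythons): AI_FIXED, AI_VARIABLE, ALL_AIS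
def gsFixed : PySem.Dict (List Char) Nat :=
  PySem.Dict.ofList [(['0','0'], 18), (['0','1'], 14), (['1','1'], 6), (['1','7'], 6)]

def gsVariable : List (List Char) :=
  [['1','0'], ['2','1'], ['3','0'], ['3','7'], ['9','2'], ['2','4','0']]

def gsAllAIs : List (List Char) :=
  [['0','0'], ['0','1'], ['1','0'], ['1','1'], ['1','7'], ['2','1'], ['3','0'], ['3','7'], ['9','2'], ['2','4','0']]

-- normalize_raw: '\x1d' and '\u001d' are the same code point (29), exactly as in the Python
def normalize_rawA (s : List Char) : List Char :=
  PySem.Chars.replace (PySem.Chars.replace (PySem.Chars.replace (PySem.Chars.replace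
    s [Char.ofNat 29] ['|']) [Char.ofNat 29] ['|']) ['('] []) [')'] []

-- the variable-length branch of A: end = len; pipe = raw.find('|', start); for nxt in ALL_AIS: …
def endVarA (s : List Char) (start : Nat) : Int :=
  let end0 : Int := s.length
  let pipe := PySem.Chars.findFrom s ['|'] (start : Int) none
  let end1 : Int := if pipe ≠ -1 then pipe else end0
  gsAllAIs.foldl (fun e nxt =>
    let p := PySem.Chars.findFrom s nxt (start : Int) none
    if p ≠ -1 ∧ p < e then p else e) end1

-- the while loop of A; fuel = len(raw) suffices since i strictly increases each iteration
def loopA (s : List Char) : Nat → Nat → PySem.Dict (List Char) (List Char) → PySem.Dict (List Char) (List Char)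
  | 0, _, d => d
  | fuel+1, i, d =>
    if i < s.length then
      let (ai, start) :=
        if PySem.List.slice s (some (i : Int)) (some ((i : Int) + 3)) = ['2','4','0'] then
          (['2','4','0'], i + 3)
        else
          (PySem.List.slice s (some (i : Int)) (some ((i : Int) + 2)), i + 2)
      if gsFixed.contains ai then
        let ln := (gsFixed.get? ai).getD 0
        loopA s fuel (start + ln) (d.insert ai (PySem.List.slice s (some (start : Int)) (some ((start : Int) + (ln : Int)))))
      else if ai ∈ gsVariable then
        let e := endVarA s start
        loopA s fuel e.toNat (d.insert ai (PySem.List.slice s (some (start : Int)) (some e)))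
      else
        loopA s fuel (i + 1) d
    else d

def decode_gs1 (raw : String) : List (String × String) :=
  let s := normalize_rawA raw.toList
  ((loopA s s.length 0 PySem.Dict.empty).items).map (fun p => (String.ofList p.1, String.ofList p.2))

-- ===== PORT B =====

-- raw[pos] == '|' or any(raw.startswith(a, pos) for a in ALL_AIS); all patterns are nonempty, so
-- Python's startswith(a, pos) is exactly `a` being a prefix of the suffix from pos
def hitAtB (s : List Char) (pos : Nat) : Bool :=
  (PySem.List.pyGet? s (pos : Int) == some '|') || gsAllAIs.any (fun a => PySem.Chars.startswith (s.drop pos) a)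

-- _next_stop: scan forward from pos to the first boundary
def nextStopB (s : List Char) (pos : Nat) : Nat :=
  if h : pos < s.length then
    if hitAtB s pos then pos else nextStopB s (pos + 1)
  else s.length
termination_by s.length - pos

def loopB (s : List Char) : Nat → Nat → PySem.Dict (List Char) (List Char) → PySem.Dict (List Char) (List Char)
  | 0, _, d => d
  | fuel+1, i, d =>
    if i < s.length then
      let (ai, start) :=
        if PySem.Chars.startswith (s.drop i) ['2','4','0'] then   -- raw.startswith("240", i)
          (['2','4','0'], i + 3)
        else
          (PySem.List.slice s (some (i : Int)) (some ((i : Int) + 2)), i + 2)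
      if gsFixed.contains ai then
        let ln := (gsFixed.get? ai).getD 0
        loopB s fuel (start + ln) (d.insert ai (PySem.List.slice s (some (start : Int)) (some ((start : Int) + (ln : Int)))))
      else if ai ∈ gsVariable then
        let e := nextStopB s start
        loopB s fuel e (d.insert ai (PySem.List.slice s (some (start : Int)) (some (e : Int))))
      else
        loopB s fuel (i + 1) d
    else d

def decode_gs1_alt (raw : String) : List (String × String) :=
  let s := PySem.Chars.replace (PySem.Chars.replace (PySem.Chars.replace (PySem.Chars.replace
    raw.toList [Char.ofNat 29] ['|']) [Char.ofNat 29] ['|']) ['('] []) [')'] []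
  ((loopB s s.length 0 PySem.Dict.empty).items).map (fun p => (String.ofList p.1, String.ofList p.2))

-- ===== PRECONDITION & SPEC =====
def Spec_decode_gs1 (raw : String) (out : List (String × String)) : Prop := out = decode_gs1_alt raw
instance (raw : String) (out : List (String × String)) : Decidable (Spec_decode_gs1 raw out) := by unfold Spec_decode_gs1; infer_instance

-- ===== CLAIM (what is proved, stated in full; the proofs are below) =====
def Claim_equal_decode_gs1 : Prop := ∀ (raw : String), Dom_decode_gs1 raw → Spec_decode_gs1 raw (decode_gs1 raw)

-- ===== LEMMAS AND PROOFS =====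

-- generic facts about A's min-of-found-positions fold
theorem foldMin_le_init {α : Type} (f : α → Int) (l : List α) (e : Int) :
    l.foldl (fun e x => if f x ≠ -1 ∧ f x < e then f x else e) e ≤ e := by
  induction l generalizing e with
  | nil => simp
  | cons x xs ih =>
    simp only [List.foldl_cons]
    split_ifs with h
    · exact le_trans (ih _) (le_of_lt h.2)
    · exact ih _

theorem foldMin_le_mem {α : Type} (f : α → Int) (l : List α) :
    ∀ (e : Int) (x : α), x ∈ l → f x ≠ -1 →
      l.foldl (fun e x => if f x ≠ -1 ∧ f x < e then f x else e) e ≤ f x := by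
  induction l with
  | nil => intro e x hx; simp at hx
  | cons y ys ih =>
    intro e x hx hne
    simp only [List.foldl_cons]
    rcases List.mem_cons.mp hx with rfl | hx'
    · split_ifs with h
      · exact foldMin_le_init f ys (f x)
      · have : ¬ f x < e := fun hlt => h ⟨hne, hlt⟩
        exact le_trans (foldMin_le_init f ys e) (not_lt.mp this)
    · exact ih _ x hx' hne

theorem foldMin_eq_init_or_mem {α : Type} (f : α → Int) (l : List α) (e : Int) :
    l.foldl (fun e x => if f x ≠ -1 ∧ f x < e then f x else e) e = e ∨
      ∃ x ∈ l, f x ≠ -1 ∧ l.foldl (fun e x => if f x ≠ -1 ∧ f x < e then f x else e) e = f x := by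
  induction l generalizing e with
  | nil => exact Or.inl rfl
  | cons y ys ih =>
    simp only [List.foldl_cons]
    split_ifs with h
    · rcases ih (f y) with h1 | ⟨x, hx, hne, hval⟩
      · exact Or.inr ⟨y, List.mem_cons_self, h.1, h1⟩
      · exact Or.inr ⟨x, List.mem_cons_of_mem _ hx, hne, hval⟩
    · rcases ih e with h1 | ⟨x, hx, hne, hval⟩
      · exact Or.inl h1
      · exact Or.inr ⟨x, List.mem_cons_of_mem _ hx, hne, hval⟩

theorem foldMin_all_neg {α : Type} (f : α → Int) (l : List α) :
    ∀ (e : Int), (∀ x ∈ l, f x = -1) →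
      l.foldl (fun e x => if f x ≠ -1 ∧ f x < e then f x else e) e = e := by
  induction l with
  | nil => intro e _; rfl
  | cons y ys ih =>
    intro e h
    simp only [List.foldl_cons, h y List.mem_cons_self]
    simp only [ne_eq, not_true_eq_false, false_and, if_false]
    exact ih e (fun x hx => h x (List.mem_cons_of_mem _ hx))

theorem singleton_prefix_iff {c : Char} {t : List Char} : [c] <+: t ↔ t.head? = some c := by
  cases t with
  | nil => simp
  | cons a t =>
    constructor
    · rintro ⟨u, hu⟩
      simp only [List.cons_append, List.cons.injEq] at hu
      simp [hu.1]
    · intro h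
      simp only [List.head?_cons, Option.some.injEq] at h
      exact ⟨t, by simp [h]⟩

theorem infix_iff_exists_prefix_drop {l m : List Char} : l <:+: m ↔ ∃ j, l <+: m.drop j := by
  constructor
  · rintro ⟨u, v, rfl⟩
    exact ⟨u.length, by simp⟩
  · rintro ⟨j, hj⟩
    exact hj.isInfix.trans (m.drop_suffix j).isInfix

-- hitAtB says: '|' or some AI pattern starts at position j
theorem hitAtB_iff (s : List Char) (j : Nat) :
    hitAtB s j = true ↔ ∃ a ∈ (['|'] :: gsAllAIs), a <+: s.drop j := by
  simp only [hitAtB, Bool.or_eq_true, beq_iff_eq, List.any_eq_true,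
    PySem.List.pyGet?_natCast, PySem.Chars.startswith_iff, List.mem_cons]
  constructor
  · rintro (h | ⟨a, ha, hp⟩)
    · exact ⟨['|'], Or.inl rfl, singleton_prefix_iff.mpr (by rw [List.head?_drop]; exact h)⟩
    · exact ⟨a, Or.inr ha, hp⟩
  · rintro ⟨a, (rfl | ha), hp⟩
    · exact Or.inl (by rw [← List.head?_drop]; exact singleton_prefix_iff.mp hp)
    · exact Or.inr ⟨a, ha, hp⟩

-- basic bounds and minimality of B's scan
theorem nextStopB_le_len (s : List Char) (pos : Nat) : nextStopB s pos ≤ s.length := by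
  fun_induction nextStopB s pos with
  | case1 pos h hhit => exact le_of_lt h
  | case2 pos h hhit ih => exact ih
  | case3 pos h => exact le_refl _

theorem le_nextStopB (s : List Char) (pos : Nat) : pos ≤ s.length → pos ≤ nextStopB s pos := by
  fun_induction nextStopB s pos with
  | case1 pos h hhit => intro _; exact le_refl _
  | case2 pos h hhit ih => intro _; have := ih (by omega); omega
  | case3 pos h => intro h2; exact h2

theorem nextStopB_of_ge (s : List Char) (pos : Nat) (h : s.length ≤ pos) :
    nextStopB s pos = s.length := by
  rw [nextStopB]; simp [Nat.not_lt.mpr h]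

theorem nextStopB_not_hit (s : List Char) (pos : Nat) :
    ∀ j, pos ≤ j → j < nextStopB s pos → hitAtB s j = false := by
  fun_induction nextStopB s pos with
  | case1 pos h hhit => intro j h1 h2; omega
  | case2 pos h hhit ih =>
    intro j h1 h2
    rcases Nat.eq_or_lt_of_le h1 with rfl | h1'
    · simpa using hhit
    · exact ih j h1' h2
  | case3 pos h =>
    intro j h1 h2
    omega

theorem nextStopB_hit (s : List Char) (pos : Nat) (h : nextStopB s pos < s.length) :
    hitAtB s (nextStopB s pos) = true := by
  fun_induction nextStopB s pos with
  | case1 pos h' hhit => exact hhit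
  | case2 pos h' hhit ih => exact ih h
  | case3 pos h' => omega

theorem nextStopB_min (s : List Char) (pos : Nat) {j : Nat} (h1 : pos ≤ j)
    (h2 : hitAtB s j = true) : nextStopB s pos ≤ j := by
  by_contra h
  have := nextStopB_not_hit s pos j h1 (not_le.mp h)
  rw [h2] at this; simp at this

-- a hit at j ≥ k means the pattern occurs in the suffix from k
theorem infix_drop_of_prefix_drop {a : List Char} {s : List Char} {k j : Nat}
    (hkj : k ≤ j) (hp : a <+: s.drop j) : a <:+: s.drop k := by
  refine infix_iff_exists_prefix_drop.mpr ⟨j - k, ?_⟩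
  rw [List.drop_drop, Nat.add_sub_cancel' hkj]
  exact hp

-- findFrom with a start past the end of the string returns -1
theorem findFrom_of_len_lt (s sub : List Char) (k : Nat) (h : s.length < k) :
    PySem.Chars.findFrom s sub (k : Int) none = -1 := by
  have h1 : ((s.length : Int) < (k : Int)) := by exact_mod_cast h
  have h2 : ¬ ((k : Int) < 0) := by omega
  simp [PySem.Chars.findFrom, h1, h2]

-- THE KEY LEMMA: A's "end" (pipe find + 10 pattern finds, folded to a minimum)
-- equals B's forward scan to the first boundary.
theorem endVarA_eq (s : List Char) (start : Nat) :
    endVarA s start = ((nextStopB s start : Nat) : Int) := by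
  by_cases hs : start ≤ s.length
  · -- abbreviations
    set n := s.length with hn
    set N := nextStopB s start with hN
    have hNle : N ≤ n := nextStopB_le_len s start
    have hNge : start ≤ N := le_nextStopB s start hs
    -- facts about each findFrom
    have hfind : ∀ sub : List Char, PySem.Chars.findFrom s sub (start : Int) none ≠ -1 →
        (start : Int) ≤ PySem.Chars.findFrom s sub (start : Int) none ∧
        sub <+: s.drop (PySem.Chars.findFrom s sub (start : Int) none).toNat ∧
        ∀ i : Nat, start ≤ i → i < (PySem.Chars.findFrom s sub (start : Int) none).toNat →
          ¬ sub <+: s.drop i :=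
      fun sub h => PySem.Chars.findFrom_natCast_spec s sub start hs h
    -- a found position is a hit position (for patterns in our list), hence ≥ N … and ≤ some hit j
    have hfound_ge_N : ∀ a ∈ (['|'] :: gsAllAIs),
        PySem.Chars.findFrom s a (start : Int) none ≠ -1 →
        (N : Int) ≤ PySem.Chars.findFrom s a (start : Int) none := by
      intro a ha hne
      obtain ⟨h1, h2, _⟩ := hfind a hne
      have hpos : (0:Int) ≤ PySem.Chars.findFrom s a (start : Int) none :=
        le_trans (by exact_mod_cast Nat.zero_le start) h1
      have htn := Int.toNat_of_nonneg hpos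
      have hhit : hitAtB s (PySem.Chars.findFrom s a (start : Int) none).toNat = true :=
        (hitAtB_iff s _).mpr ⟨a, ha, h2⟩
      have hstart : start ≤ (PySem.Chars.findFrom s a (start : Int) none).toNat := by omega
      have := nextStopB_min s start hstart hhit
      omega
    -- if there is a hit at j (start ≤ j), then findFrom of the witnessing pattern lands ≤ j
    have hfound_le : ∀ a ∈ (['|'] :: gsAllAIs), ∀ j : Nat, start ≤ j → a <+: s.drop j →
        PySem.Chars.findFrom s a (start : Int) none ≠ -1 ∧
        PySem.Chars.findFrom s a (start : Int) none ≤ (j : Int) := by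
      intro a _ j hj hp
      have hne : PySem.Chars.findFrom s a (start : Int) none ≠ -1 := by
        rw [ne_eq, PySem.Chars.findFrom_natCast_eq_neg_one_iff s a start hs]
        simp only [not_not]
        exact infix_drop_of_prefix_drop hj hp
      obtain ⟨h1, _, h3⟩ := hfind a hne
      refine ⟨hne, ?_⟩
      by_contra hlt
      exact h3 j hj (by omega) hp
    -- bound on the pipe find
    have hpipe_le_n : PySem.Chars.findFrom s ['|'] (start : Int) none ≤ (n : Int) := by
      by_cases hne : PySem.Chars.findFrom s ['|'] (start : Int) none = -1
      · rw [hne]; omega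
      · obtain ⟨h1, h2, _⟩ := hfind _ hne
        have hpos : (0:Int) ≤ PySem.Chars.findFrom s ['|'] (start : Int) none :=
          le_trans (by exact_mod_cast Nat.zero_le start) h1
        have htn := Int.toNat_of_nonneg hpos
        have hlen := h2.length_le
        simp only [List.length_drop, List.length_cons, List.length_nil] at hlen
        omega
    unfold endVarA
    simp only [← hn]
    set pipe := PySem.Chars.findFrom s ['|'] (start : Int) none with hpipe
    set e1 : Int := if pipe ≠ -1 then pipe else (n : Int) with he1
    set F := gsAllAIs.foldl (fun e nxt =>
        let p := PySem.Chars.findFrom s nxt (start : Int) none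
        if p ≠ -1 ∧ p < e then p else e) e1 with hF
    -- lower bound: N ≤ F
    have hlow : (N : Int) ≤ F := by
      rcases foldMin_eq_init_or_mem (fun nxt => PySem.Chars.findFrom s nxt (start : Int) none)
          gsAllAIs e1 with h | ⟨x, hx, hne, hval⟩
      · rw [hF, h, he1]
        split_ifs with hp
        · exact hfound_ge_N ['|'] (List.mem_cons_self) hp
        · exact_mod_cast hNle
      · rw [hF, hval]
        exact hfound_ge_N x (List.mem_cons_of_mem _ hx) hne
    -- upper bound: F ≤ N
    have hup : F ≤ (N : Int) := by
      have hFe1 : F ≤ e1 := foldMin_le_init _ _ _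
      by_cases hNn : N = n
      · have he1n : e1 ≤ (n : Int) := by
          rw [he1]; split_ifs with hp
          · exact hpipe_le_n
          · exact le_refl _
        rw [hNn]; exact le_trans hFe1 he1n
      · have hNlt : N < n := lt_of_le_of_ne hNle hNn
        have hhit := nextStopB_hit s start hNlt
        obtain ⟨a, ha, hp⟩ := (hitAtB_iff s N).mp hhit
        rcases List.mem_cons.mp ha with rfl | ha'
        · -- the hit is a pipe: pipe ≤ N and F ≤ e1 = pipe
          obtain ⟨hne, hle⟩ := hfound_le ['|'] (List.mem_cons_self) N hNge hp
          have : e1 = pipe := by rw [he1, if_pos hne]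
          rw [this] at hFe1
          exact le_trans hFe1 hle
        · -- the hit is one of the AI patterns
          obtain ⟨hne, hle⟩ := hfound_le a ha N hNge hp
          exact le_trans (foldMin_le_mem _ gsAllAIs e1 a ha' hne) hle
    omega
  · -- start past the end: every find fails, both sides are len(s)
    have hlt : s.length < start := not_le.mp hs
    have hall : ∀ x ∈ gsAllAIs, PySem.Chars.findFrom s x (start : Int) none = -1 :=
      fun x _ => findFrom_of_len_lt s x start hlt
    unfold endVarA
    simp only [findFrom_of_len_lt s ['|'] start hlt, ne_eq, not_true_eq_false, if_false]
    rw [foldMin_all_neg _ _ _ hall, nextStopB_of_ge s start (le_of_lt hlt)]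

-- the "240" tests of the two ports agree
theorem ai240_iff (s : List Char) (i : Nat) :
    PySem.List.slice s (some (i : Int)) (some ((i : Int) + 3)) = ['2','4','0'] ↔
      PySem.Chars.startswith (s.drop i) ['2','4','0'] = true := by
  have h3 : ((i : Int) + 3) = ((i + 3 : Nat) : Int) := by push_cast; ring
  rw [h3, PySem.List.slice_natCast, PySem.Chars.startswith_iff]
  have h33 : i + 3 - i = 3 := by omega
  rw [h33]
  constructor
  · intro h; rw [← h]; exact List.take_prefix 3 _
  · intro h
    have := List.prefix_iff_eq_take.mp h
    simpa using this.symm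

-- the two loops compute the same dict
theorem loop_eq (s : List Char) (fuel : Nat) :
    ∀ (i : Nat) (d : PySem.Dict (List Char) (List Char)), loopA s fuel i d = loopB s fuel i d := by
  induction fuel with
  | zero => intro i d; rfl
  | succ f ih =>
    intro i d
    rw [loopA, loopB]
    by_cases hi : i < s.length
    · rw [if_pos hi, if_pos hi]
      by_cases h240 : PySem.List.slice s (some (i : Int)) (some ((i : Int) + 3)) = ['2','4','0']
      · have h240' : PySem.Chars.startswith (s.drop i) ['2','4','0'] = true := (ai240_iff s i).mp h240
        simp only [if_pos h240, if_pos h240']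
        split_ifs with hfix hvar
        · exact ih _ _
        · rw [endVarA_eq, Int.toNat_natCast]
          exact ih _ _
        · exact ih _ _
      · have h240' : ¬ PySem.Chars.startswith (s.drop i) ['2','4','0'] = true :=
          fun h => h240 ((ai240_iff s i).mpr h)
        simp only [if_neg h240, if_neg h240']
        split_ifs with hfix hvar
        · exact ih _ _
        · rw [endVarA_eq, Int.toNat_natCast]
          exact ih _ _
        · exact ih _ _
    · rw [if_neg hi, if_neg hi]

-- ===== VERDICT (by name: the statement is the Claim_ definition above) =====
theorem decode_gs1_spec : Claim_equal_decode_gs1 := by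
  intro raw _
  unfold Spec_decode_gs1 decode_gs1 decode_gs1_alt normalize_rawA
  simp only [loop_eq]
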